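-- pv_equiv track=rewrite | github.com/ilyafedotov-ops/dev-pipeline | tests/harness/components/failure_detection.py | _find_related_commands
-- ===== SOURCE A (Python) =====
-- from typing import List, Dict, Any, Optional, Set, Tuple
--
-- def _find_related_commands(command_name: str) -> List[str]:
--     """Find commands related to the missing command."""
--     related = []
--
--     # Group related commands
--     command_groups = {
--         "cli": ["tasksgodzilla_cli", "tasksgodzilla", "cli"],
--         "onboarding": ["onboard_repo", "onboard", "setup"],
--         "protocol": ["protocol_pipeline", "protocol", "workflow"],
--         "quality": ["quality_orchestrator", "quality", "qa"],
--         "spec": ["spec_audit", "spec", "validate"],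
--         "api": ["api_server", "api", "server"],
--         "worker": ["rq_worker", "worker", "queue"],
--         "tui": ["tasksgodzilla_tui", "tui", "terminal"]
--     }
--
--     for group_name, commands in command_groups.items():
--         if command_name in commands:
--             related = [cmd for cmd in commands if cmd != command_name]
--             break
--
--     return related
-- ===== SOURCE B (Python) =====
-- from typing import List
--
-- # Reverse index: each command name -> its siblings (other members of its group),
-- # built once; the function is then a single dict lookup.
-- _GROUPS = [
--     ["tasksgodzilla_cli", "tasksgodzilla", "cli"],
--     ["onboard_repo", "onboard", "setup"],
--     ["protocol_pipeline", "protocol", "workflow"],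
--     ["quality_orchestrator", "quality", "qa"],
--     ["spec_audit", "spec", "validate"],
--     ["api_server", "api", "server"],
--     ["rq_worker", "worker", "queue"],
--     ["tasksgodzilla_tui", "tui", "terminal"],
-- ]
--
-- _RELATED = {}
-- for _cmds in _GROUPS:
--     for _c in _cmds:
--         _RELATED[_c] = [other for other in _cmds if other != _c]
--
--
-- def _find_related_commands(command_name: str) -> List[str]:
--     """Find commands related to the missing command."""
--     return _RELATED.get(command_name, [])
-- ===== Notes on version B (the rewrite author's own statement) =====
-- stated objective: idiomatic
-- what changed: Replaces the per-group membership scan with early break by a precomputed reverse index mapping each command to its sibling list, so the function body is a single dict lookup.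
import Mathlib
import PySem

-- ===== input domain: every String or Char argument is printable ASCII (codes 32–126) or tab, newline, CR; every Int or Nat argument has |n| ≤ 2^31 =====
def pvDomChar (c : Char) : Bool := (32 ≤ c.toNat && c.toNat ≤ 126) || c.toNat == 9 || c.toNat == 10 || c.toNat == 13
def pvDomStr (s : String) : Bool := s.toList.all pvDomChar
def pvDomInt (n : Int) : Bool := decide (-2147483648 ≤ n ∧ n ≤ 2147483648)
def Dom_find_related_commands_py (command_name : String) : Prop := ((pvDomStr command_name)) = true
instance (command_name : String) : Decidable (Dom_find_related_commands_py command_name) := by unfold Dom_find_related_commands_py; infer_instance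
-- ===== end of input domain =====

-- B replaces A's per-group scan by a precomputed reverse index (command -> siblings); lookup only, same values.

-- ===== PORT A =====
-- the dict of groups, in insertion order (group names kept as in the Python)
def pvGroupsA : List (String × List String) :=
  [("cli", ["tasksgodzilla_cli", "tasksgodzilla", "cli"]),
   ("onboarding", ["onboard_repo", "onboard", "setup"]),
   ("protocol", ["protocol_pipeline", "protocol", "workflow"]),
   ("quality", ["quality_orchestrator", "quality", "qa"]),
   ("spec", ["spec_audit", "spec", "validate"]),
   ("api", ["api_server", "api", "server"]),
   ("worker", ["rq_worker", "worker", "queue"]),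
   ("tui", ["tasksgodzilla_tui", "tui", "terminal"])]

-- the for-loop with early break, as structural recursion over the items
def pvLoopA (command_name : String) (related : List String) : List (String × List String) → List String
  | [] => related
  | (_, commands) :: rest =>
      if commands.contains command_name then
        commands.filter (fun cmd => cmd ≠ command_name)   -- break: stop scanning
      else
        pvLoopA command_name related rest

def find_related_commands_py (command_name : String) : List String :=
  pvLoopA command_name [] pvGroupsA

-- ===== PORT B =====
def pvGroupsB : List (List String) :=
  [["tasksgodzilla_cli", "tasksgodzilla", "cli"],
   ["onboard_repo", "onboard", "setup"],
   ["protocol_pipeline", "protocol", "workflow"],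
   ["quality_orchestrator", "quality", "qa"],
   ["spec_audit", "spec", "validate"],
   ["api_server", "api", "server"],
   ["rq_worker", "worker", "queue"],
   ["tasksgodzilla_tui", "tui", "terminal"]]

-- the reverse index built once: for each group, for each command, insert its sibling list
def pvRelated : PySem.Dict String (List String) :=
  pvGroupsB.foldl
    (fun d cmds =>
      cmds.foldl (fun d c => d.insert c (cmds.filter (fun other => other ≠ c))) d)
    (PySem.Dict.empty)

def find_related_commands_py_alt (command_name : String) : List String :=
  pvRelated.getD command_name []

-- ===== PRECONDITION & SPEC =====
def Spec_find_related_commands_py (command_name : String) (out : List String) : Prop := out = find_related_commands_py_alt command_name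
instance (command_name : String) (out : List String) : Decidable (Spec_find_related_commands_py command_name out) := by unfold Spec_find_related_commands_py; infer_instance

-- ===== CLAIM (what is proved, stated in full; the proofs are below) =====
def Claim_equal_find_related_commands_py : Prop := ∀ (command_name : String), Dom_find_related_commands_py command_name → Spec_find_related_commands_py command_name (find_related_commands_py command_name)

-- ===== LEMMAS AND PROOFS =====

-- ===== VERDICT (by name: the statement is the Claim_ definition above) =====
set_option maxRecDepth 8000 in
theorem find_related_commands_py_spec : Claim_equal_find_related_commands_py := by
  intro c _
  unfold Spec_find_related_commands_py find_related_commands_py find_related_commands_py_alt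
  by_cases h1 : c = "tasksgodzilla_cli"; · subst h1; decide
  by_cases h2 : c = "tasksgodzilla"; · subst h2; decide
  by_cases h3 : c = "cli"; · subst h3; decide
  by_cases h4 : c = "onboard_repo"; · subst h4; decide
  by_cases h5 : c = "onboard"; · subst h5; decide
  by_cases h6 : c = "setup"; · subst h6; decide
  by_cases h7 : c = "protocol_pipeline"; · subst h7; decide
  by_cases h8 : c = "protocol"; · subst h8; decide
  by_cases h9 : c = "workflow"; · subst h9; decide
  by_cases h10 : c = "quality_orchestrator"; · subst h10; decide
  by_cases h11 : c = "quality"; · subst h11; decide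
  by_cases h12 : c = "qa"; · subst h12; decide
  by_cases h13 : c = "spec_audit"; · subst h13; decide
  by_cases h14 : c = "spec"; · subst h14; decide
  by_cases h15 : c = "validate"; · subst h15; decide
  by_cases h16 : c = "api_server"; · subst h16; decide
  by_cases h17 : c = "api"; · subst h17; decide
  by_cases h18 : c = "server"; · subst h18; decide
  by_cases h19 : c = "rq_worker"; · subst h19; decide
  by_cases h20 : c = "worker"; · subst h20; decide
  by_cases h21 : c = "queue"; · subst h21; decide
  by_cases h22 : c = "tasksgodzilla_tui"; · subst h22; decide
  by_cases h23 : c = "tui"; · subst h23; decide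
  by_cases h24 : c = "terminal"; · subst h24; decide
  -- c matches no command: A's loop falls through to [], B's lookup misses every key
  have hrel : pvRelated = PySem.Dict.mk
    [("tasksgodzilla_cli", ["tasksgodzilla", "cli"]),
     ("tasksgodzilla", ["tasksgodzilla_cli", "cli"]),
     ("cli", ["tasksgodzilla_cli", "tasksgodzilla"]),
     ("onboard_repo", ["onboard", "setup"]),
     ("onboard", ["onboard_repo", "setup"]),
     ("setup", ["onboard_repo", "onboard"]),
     ("protocol_pipeline", ["protocol", "workflow"]),
     ("protocol", ["protocol_pipeline", "workflow"]),
     ("workflow", ["protocol_pipeline", "protocol"]),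
     ("quality_orchestrator", ["quality", "qa"]),
     ("quality", ["quality_orchestrator", "qa"]),
     ("qa", ["quality_orchestrator", "quality"]),
     ("spec_audit", ["spec", "validate"]),
     ("spec", ["spec_audit", "validate"]),
     ("validate", ["spec_audit", "spec"]),
     ("api_server", ["api", "server"]),
     ("api", ["api_server", "server"]),
     ("server", ["api_server", "api"]),
     ("rq_worker", ["worker", "queue"]),
     ("worker", ["rq_worker", "queue"]),
     ("queue", ["rq_worker", "worker"]),
     ("tasksgodzilla_tui", ["tui", "terminal"]),
     ("tui", ["tasksgodzilla_tui", "terminal"]),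
     ("terminal", ["tasksgodzilla_tui", "tui"])] := by decide
  rw [hrel]
  simp [pvGroupsA, pvLoopA, PySem.Dict.getD, PySem.Dict.get?, beq_iff_eq,
        h1, h2, h3, h4, h5, h6, h7, h8, h9, h10, h11, h12, h13, h14, h15, h16,
        h17, h18, h19, h20, h21, h22, h23, h24,
        Ne.symm h1, Ne.symm h2, Ne.symm h3, Ne.symm h4, Ne.symm h5, Ne.symm h6,
        Ne.symm h7, Ne.symm h8, Ne.symm h9, Ne.symm h10, Ne.symm h11, Ne.symm h12,
        Ne.symm h13, Ne.symm h14, Ne.symm h15, Ne.symm h16, Ne.symm h17, Ne.symm h18,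
        Ne.symm h19, Ne.symm h20, Ne.symm h21, Ne.symm h22, Ne.symm h23, Ne.symm h24]
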